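-- pv_equiv track=rewrite | github.com/yos17/slides_kebaktian | simple_generator.py | split_lyrics_into_slides
-- ===== SOURCE A (Python) =====
-- def split_lyrics_into_slides(lyrics):
--     """Split lyrics into slides at paragraph breaks (empty lines)."""
--     slides = []
--     current_slide = []
--
--     for line in lyrics:
--         if line.strip():  # Non-empty line
--             current_slide.append(line)
--         else:  # Empty line - natural paragraph break
--             if current_slide:  # Only create slide if we have content
--                 slides.append(current_slide.copy())
--                 current_slide = []
--
--     # Add remaining content if any
--     if current_slide:
--         slides.append(current_slide)
--
--     return slides
-- ===== SOURCE B (Python) =====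
-- def split_lyrics_into_slides(lyrics):
--     """Split lyrics into slides at paragraph breaks (empty lines).
--
--     Run-scanning version: instead of an accumulator with flush logic, walk the
--     list, skip blank lines, and slice out each maximal run of non-empty lines
--     as one slide."""
--     slides = []
--     rest = lyrics
--     while rest:
--         if rest[0].strip():
--             k = 1
--             while k < len(rest) and rest[k].strip():
--                 k += 1
--             slides.append(rest[:k])
--             rest = rest[k:]
--         else:
--             rest = rest[1:]
--     return slides
-- ===== Notes on version B (the rewrite author's own statement) =====
-- stated objective: alternative
-- what changed: Replaced the accumulator-with-flush loop by a run-scanner that skips blank lines and slices out each maximal non-empty run as a slide, so there is no current_slide state or end-of-loop flush.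
import Mathlib
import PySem

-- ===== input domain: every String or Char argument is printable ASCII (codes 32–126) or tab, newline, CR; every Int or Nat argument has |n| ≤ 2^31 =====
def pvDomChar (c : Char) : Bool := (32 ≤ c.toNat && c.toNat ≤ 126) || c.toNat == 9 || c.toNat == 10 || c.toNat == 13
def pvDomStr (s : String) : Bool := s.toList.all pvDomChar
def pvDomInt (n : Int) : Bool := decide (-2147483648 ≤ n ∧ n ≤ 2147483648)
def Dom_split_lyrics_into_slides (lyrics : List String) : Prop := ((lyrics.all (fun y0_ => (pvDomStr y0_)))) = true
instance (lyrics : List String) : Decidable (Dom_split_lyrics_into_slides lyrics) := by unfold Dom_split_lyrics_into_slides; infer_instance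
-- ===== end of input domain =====

-- B replaces A's accumulator-with-flush loop by a run-scanner that slices out
-- maximal non-empty runs (alternative decomposition, same cost).


-- ===== PORT A =====
-- one step of A's for-loop over state (slides, current_slide)
def stepA (st : List (List String) × List String) (line : String) :
    List (List String) × List String :=
  if PySem.Str.strip line ≠ "" then (st.1, st.2 ++ [line])
  else if st.2 ≠ [] then (st.1 ++ [st.2], [])
  else st

-- the final "add remaining content if any"
def finA (p : List (List String) × List String) : List (List String) :=
  if p.2 ≠ [] then p.1 ++ [p.2] else p.1

def split_lyrics_into_slides (lyrics : List String) : List (List String) :=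
  finA (lyrics.foldl stepA ([], []))

-- ===== PORT B =====
-- `line.strip()` truthiness, named so the run predicate is a single constant
def nonblank (s : String) : Bool := PySem.Str.strip s ≠ ""

-- run-scanner: skip a blank head, otherwise take the maximal non-empty run
def split_lyrics_into_slides_alt : List String → List (List String)
  | [] => []
  | l :: ls =>
    if nonblank l then
      (l :: ls.takeWhile nonblank) ::
        split_lyrics_into_slides_alt (ls.dropWhile nonblank)
    else
      split_lyrics_into_slides_alt ls
termination_by ls => ls.length
decreasing_by
  · have := List.length_dropWhile_le nonblank ls
    simp; omega
  · simp

-- ===== PRECONDITION & SPEC =====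
def Spec_split_lyrics_into_slides (lyrics : List String) (out : List (List String)) : Prop := out = split_lyrics_into_slides_alt lyrics
instance (lyrics : List String) (out : List (List String)) : Decidable (Spec_split_lyrics_into_slides lyrics out) := by unfold Spec_split_lyrics_into_slides; infer_instance

-- ===== CLAIM (what is proved, stated in full; the proofs are below) =====
def Claim_equal_split_lyrics_into_slides : Prop := ∀ (lyrics : List String), Dom_split_lyrics_into_slides lyrics → Spec_split_lyrics_into_slides lyrics (split_lyrics_into_slides lyrics)

-- ===== LEMMAS AND PROOFS =====

-- folding A's step over a run of non-empty lines just appends them to current_slide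
lemma foldl_stepA_run (run : List String)
    (h : ∀ s ∈ run, PySem.Str.strip s ≠ "") :
    ∀ (rest : List String) (slides : List (List String)) (cur : List String),
      List.foldl stepA (slides, cur) (run ++ rest)
        = List.foldl stepA (slides, cur ++ run) rest := by
  induction run with
  | nil => intro rest slides cur; simp
  | cons a as ih =>
    intro rest slides cur
    have ha : PySem.Str.strip a ≠ "" := h a (by simp)
    have hstep : stepA (slides, cur) a = (slides, cur ++ [a]) := by
      simp [stepA, ha]
    simp only [List.cons_append, List.foldl_cons, hstep]
    have := ih (fun s hs => h s (by simp [hs])) rest slides (cur ++ [a])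
    simpa using this

-- main invariant: A's loop from state (slides, []) computes slides ++ B's result
lemma mainA : ∀ (n : ℕ) (ls : List String), ls.length ≤ n →
    ∀ (slides : List (List String)),
      finA (List.foldl stepA (slides, []) ls)
        = slides ++ split_lyrics_into_slides_alt ls := by
  intro n
  induction n with
  | zero =>
    intro ls hls slides
    have : ls = [] := List.eq_nil_of_length_eq_zero (Nat.le_zero.mp hls)
    subst this
    simp [finA, split_lyrics_into_slides_alt]
  | succ m ih =>
    intro ls hls slides
    cases ls with
    | nil => simp [finA, split_lyrics_into_slides_alt]
    | cons l ls' =>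
      by_cases hb : PySem.Str.strip l = ""
      · -- blank head: A's step is a no-op (current empty), B skips it
        have hstep : stepA (slides, ([] : List String)) l = (slides, []) := by
          simp [stepA, hb]
        have hnb : nonblank l = false := by simp [nonblank, hb]
        simp only [List.foldl_cons, hstep]
        rw [ih ls' (by simpa using Nat.le_of_succ_le_succ hls) slides]
        rw [split_lyrics_into_slides_alt, hnb]
        simp
      · -- non-empty head: the run l :: takeWhile … becomes one slide
        have hstep : stepA (slides, ([] : List String)) l = (slides, [l]) := by
          simp [stepA, hb]
        have hnb : nonblank l = true := by simp [nonblank, hb]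
        have hsplit : ls' = ls'.takeWhile nonblank ++ ls'.dropWhile nonblank :=
          (List.takeWhile_append_dropWhile (p := nonblank) (l := ls')).symm
        have hrunmem : ∀ s ∈ ls'.takeWhile nonblank, PySem.Str.strip s ≠ "" := by
          intro s hs
          have := List.mem_takeWhile_imp hs
          simpa [nonblank] using this
        have hfold :
            List.foldl stepA (slides, [l]) ls'
              = List.foldl stepA (slides, [l] ++ ls'.takeWhile nonblank)
                  (ls'.dropWhile nonblank) := by
          conv_lhs => rw [hsplit]
          exact foldl_stepA_run _ hrunmem _ _ _
        rw [List.foldl_cons, hstep, hfold]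
        rw [split_lyrics_into_slides_alt, hnb]
        simp only [if_true]
        cases hdrop : ls'.dropWhile nonblank with
        | nil =>
          simp [finA, split_lyrics_into_slides_alt]
        | cons b rest =>
          have hne : ls'.dropWhile nonblank ≠ [] := by simp [hdrop]
          have hbblank : PySem.Str.strip b = "" := by
            have := List.head_dropWhile_not nonblank hne
            simp only [hdrop, List.head_cons] at this
            simpa [nonblank] using this
          have hstepb : stepA (slides, [l] ++ ls'.takeWhile nonblank) b
              = (slides ++ [[l] ++ ls'.takeWhile nonblank], []) := by
            simp [stepA, hbblank]
          have hlen : rest.length ≤ m := by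
            have h1 : (ls'.dropWhile nonblank).length ≤ ls'.length :=
              List.length_dropWhile_le nonblank ls'
            have h2 : ls'.length ≤ m := by simpa using Nat.le_of_succ_le_succ hls
            rw [hdrop] at h1
            simp at h1
            omega
          rw [List.foldl_cons, hstepb, ih rest hlen]
          rw [split_lyrics_into_slides_alt]
          have hnbb : nonblank b = false := by simp [nonblank, hbblank]
          rw [hnbb]
          simp

-- ===== VERDICT (by name: the statement is the Claim_ definition above) =====
theorem split_lyrics_into_slides_spec : Claim_equal_split_lyrics_into_slides := by
  intro lyrics _
  unfold Spec_split_lyrics_into_slides split_lyrics_into_slides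
  simpa using (mainA lyrics.length lyrics le_rfl [])
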